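-- pv_equiv track=rewrite | github.com/secure-software-engineering/HeaderGen | headergen/headergen.py | get_library_classified
-- ===== SOURCE A (Python) =====
-- def get_library_classified(doc_string):
--     classified = {}
--     for _ds_func, _ds_string in doc_string.items():
--         _lib = _ds_func.split(".")[0]
--         if _lib not in classified:
--             classified[_lib] = {}
--
--         classified[_lib][_ds_func] = _ds_string
--
--     return classified
-- ===== SOURCE B (Python) =====
-- def get_library_classified(doc_string):
--     # Two-stage pass: collect distinct library prefixes in first-appearance
--     # order, then build each library's group by a filtering dict comprehension.
--     libs = []
--     for func in doc_string:
--         lib = func.split(".")[0]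
--         if lib not in libs:
--             libs.append(lib)
--     return {lib: {func: s for func, s in doc_string.items()
--                   if func.split(".")[0] == lib}
--             for lib in libs}
-- ===== Notes on version B (the rewrite author's own statement) =====
-- stated objective: alternative
-- what changed: Replaced the single incremental scan that inserts into a nested dict with a two-stage pass: first collect the distinct library prefixes in first-appearance order, then build each library's group with a filtering dict comprehension.
import Mathlib
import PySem

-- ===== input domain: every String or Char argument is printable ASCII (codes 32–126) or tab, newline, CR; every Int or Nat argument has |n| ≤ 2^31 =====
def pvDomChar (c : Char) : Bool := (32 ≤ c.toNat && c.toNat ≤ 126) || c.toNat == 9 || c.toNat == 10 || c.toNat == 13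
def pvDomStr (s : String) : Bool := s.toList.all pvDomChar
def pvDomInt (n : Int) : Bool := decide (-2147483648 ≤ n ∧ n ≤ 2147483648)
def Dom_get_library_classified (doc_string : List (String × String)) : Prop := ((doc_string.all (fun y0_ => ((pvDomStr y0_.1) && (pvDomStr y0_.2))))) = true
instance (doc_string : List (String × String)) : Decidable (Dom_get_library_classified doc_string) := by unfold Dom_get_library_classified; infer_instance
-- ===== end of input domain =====

-- B replaces A's incremental nested-dict scan with a two-stage pass (collect the
-- distinct library prefixes, then build each group by a filtering comprehension):
-- an alternative decomposition of the same cost, proved to return the same value.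


-- ===== PORT A =====
-- _ds_func.split(".")[0]; split with the nonempty separator "." never returns an
-- empty list, so the [0] index never raises (headD's default is unreachable).
def pvLib (f : String) : String := ((PySem.Str.split? f ".").getD []).headD ""

def get_library_classified (doc_string : List (String × String)) : List (String × List (String × String)) :=
  let classified : PySem.Dict String (PySem.Dict String String) :=
    doc_string.foldl (fun classified p =>
      let lib := pvLib p.1
      let classified := if classified.contains lib then classified else classified.insert lib PySem.Dict.empty
      classified.modify lib PySem.Dict.empty (fun inner => inner.insert p.1 p.2)) PySem.Dict.empty
  classified.items.map (fun q => (q.1, q.2.items))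

-- ===== PORT B =====
def get_library_classified_alt (doc_string : List (String × String)) : List (String × List (String × String)) :=
  let libs : List String :=
    doc_string.foldl (fun ls p =>
      let lib := pvLib p.1
      if ls.contains lib then ls else ls ++ [lib]) []
  libs.map (fun lib => (lib,
    (doc_string.foldl (fun d p => if pvLib p.1 == lib then d.insert p.1 p.2 else d)
      (PySem.Dict.empty : PySem.Dict String String)).items))

-- ===== PRECONDITION & SPEC =====
def Spec_get_library_classified (doc_string : List (String × String)) (out : List (String × List (String × String))) : Prop := out = get_library_classified_alt doc_string
instance (doc_string : List (String × String)) (out : List (String × List (String × String))) : Decidable (Spec_get_library_classified doc_string out) := by unfold Spec_get_library_classified; infer_instance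

-- ===== CLAIM (what is proved, stated in full; the proofs are below) =====
def Claim_equal_get_library_classified : Prop := ∀ (doc_string : List (String × String)), Dom_get_library_classified doc_string → Spec_get_library_classified doc_string (get_library_classified doc_string)

-- ===== LEMMAS AND PROOFS =====

-- A's loop body, named for the proofs (definitionally the lambda in the port).
def pvStepA (d : PySem.Dict String (PySem.Dict String String)) (p : String × String) :
    PySem.Dict String (PySem.Dict String String) :=
  let lib := pvLib p.1
  let d := if d.contains lib then d else d.insert lib PySem.Dict.empty
  d.modify lib PySem.Dict.empty (fun inner => inner.insert p.1 p.2)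

lemma pvStepA_keys (d : PySem.Dict String (PySem.Dict String String)) (p : String × String) :
    (pvStepA d p).keys = if d.contains (pvLib p.1) then d.keys else d.keys ++ [pvLib p.1] := by
  unfold pvStepA
  by_cases h : d.contains (pvLib p.1) = true
  · simp only [h, if_true]
    rw [PySem.Dict.keys_modify, PySem.Dict.keys_insert_of_contains _ _ h]
  · simp only [Bool.not_eq_true] at h
    simp only [h, Bool.false_eq_true, if_false]
    rw [PySem.Dict.keys_modify, PySem.Dict.insert_insert_self,
      PySem.Dict.keys_insert_of_not_contains _ _ h]

lemma pvStepA_getD (d : PySem.Dict String (PySem.Dict String String)) (p : String × String)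
    (l : String) :
    (pvStepA d p).getD l PySem.Dict.empty =
      if pvLib p.1 == l then (d.getD l PySem.Dict.empty).insert p.1 p.2
      else d.getD l PySem.Dict.empty := by
  unfold pvStepA
  by_cases hc : d.contains (pvLib p.1) = true
  · simp only [hc, if_true]
    rw [PySem.Dict.getD_modify]
    by_cases hl : pvLib p.1 = l
    · simp [hl]
    · simp [hl, Ne.symm hl]
  · simp only [Bool.not_eq_true] at hc
    simp only [hc, Bool.false_eq_true, if_false]
    rw [PySem.Dict.getD_modify]
    by_cases hl : pvLib p.1 = l
    · subst hl
      rw [PySem.Dict.getD_of_not_contains d _ hc]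
      simp
    · simp [hl, Ne.symm hl, PySem.Dict.getD_insert]

-- keys of A's accumulated dict = B's libs fold, and they stay Nodup.
lemma pv_keys_fold (ds : List (String × String)) :
    ∀ (d : PySem.Dict String (PySem.Dict String String)), d.keys.Nodup →
      (ds.foldl pvStepA d).keys.Nodup ∧
      (ds.foldl pvStepA d).keys =
        ds.foldl (fun ls p => if ls.contains (pvLib p.1) then ls else ls ++ [pvLib p.1]) d.keys := by
  induction ds with
  | nil => intro d h; exact ⟨h, rfl⟩
  | cons p rest ih =>
    intro d h
    have hkey : (pvStepA d p).keys =
        if d.keys.contains (pvLib p.1) then d.keys else d.keys ++ [pvLib p.1] := by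
      rw [pvStepA_keys]
      rw [PySem.Dict.contains_eq_decide_mem_keys]
      simp
    have hnd : (pvStepA d p).keys.Nodup := by
      rw [hkey]
      by_cases hm : (pvLib p.1) ∈ d.keys
      · simp [hm, h]
      · simp only [List.contains_iff_mem, hm, if_false]
        rw [List.nodup_append]
        refine ⟨h, by simp, ?_⟩
        intro a ha b hb
        rw [List.mem_singleton] at hb
        subst hb
        exact fun e => hm (e ▸ ha)
    have := ih (pvStepA d p) hnd
    refine ⟨this.1, ?_⟩
    simpa [hkey] using this.2

-- each library's inner dict in A's result = B's filtering insert fold.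
lemma pv_getD_fold (ds : List (String × String)) (l : String) :
    ∀ (d : PySem.Dict String (PySem.Dict String String)),
      (ds.foldl pvStepA d).getD l PySem.Dict.empty =
        ds.foldl (fun dd p => if pvLib p.1 == l then dd.insert p.1 p.2 else dd)
          (d.getD l PySem.Dict.empty) := by
  induction ds with
  | nil => intro d; rfl
  | cons p rest ih =>
    intro d
    simp only [List.foldl_cons]
    rw [ih (pvStepA d p), pvStepA_getD]

theorem get_library_classified_eq_alt (ds : List (String × String)) :
    get_library_classified ds = get_library_classified_alt ds := by
  have hk := pv_keys_fold ds PySem.Dict.empty (by simp [PySem.Dict.keys_empty])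
  have hitems : (ds.foldl pvStepA PySem.Dict.empty).items =
      (ds.foldl pvStepA PySem.Dict.empty).keys.map
        (fun k => (k, (ds.foldl pvStepA PySem.Dict.empty).getD k PySem.Dict.empty)) :=
    PySem.Dict.items_eq_map_keys _ hk.1 _
  show (ds.foldl pvStepA PySem.Dict.empty).items.map (fun q => (q.1, q.2.items)) = _
  rw [hitems]
  unfold get_library_classified_alt
  rw [hk.2]
  simp only [List.map_map, PySem.Dict.keys_empty]
  apply List.map_congr_left
  intro l _
  simp only [Function.comp]
  rw [pv_getD_fold]
  simp [PySem.Dict.getD_empty]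

-- ===== VERDICT (by name: the statement is the Claim_ definition above) =====
theorem get_library_classified_spec : Claim_equal_get_library_classified := by
  intro ds _
  exact get_library_classified_eq_alt ds
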